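-- pv_equiv track=rewrite | github.com/4ng31/chesstest | main.py | replacePiece
-- ===== SOURCE A (Python) =====
-- def replacePiece(text):
--     PIECE_SYMBOLS = {'P': '♟', 'B': '♝', 'N': '♞',
--                      'R': '♜', 'Q': '♛', 'K': '♚',
--                      'p': '♙', 'b': '♗', 'n': '♘',
--                      'r': '♖', 'q': '♕', 'k': '♔'}
--     for k, v in PIECE_SYMBOLS.items():
--         text = text.replace("{}".format(k), "{}".format(v))
--     return text
-- ===== SOURCE B (Python) =====
-- def replacePiece(text):
--     keys = "PBNRQKpbnrqk"
--     vals = "\u265f\u265d\u265e\u265c\u265b\u265a\u2659\u2657\u2658\u2656\u2655\u2654"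
--     out = []
--     for c in text:
--         i = keys.find(c)
--         out.append(vals[i] if i >= 0 else c)
--     return ''.join(out)
-- ===== Notes on version B (the rewrite author's own statement) =====
-- stated objective: alternative
-- what changed: Replaces twelve sequential whole-string str.replace passes (and the dict) with a single character-by-character pass that looks each character up by position in a parallel key/value string pair.
import Mathlib
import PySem

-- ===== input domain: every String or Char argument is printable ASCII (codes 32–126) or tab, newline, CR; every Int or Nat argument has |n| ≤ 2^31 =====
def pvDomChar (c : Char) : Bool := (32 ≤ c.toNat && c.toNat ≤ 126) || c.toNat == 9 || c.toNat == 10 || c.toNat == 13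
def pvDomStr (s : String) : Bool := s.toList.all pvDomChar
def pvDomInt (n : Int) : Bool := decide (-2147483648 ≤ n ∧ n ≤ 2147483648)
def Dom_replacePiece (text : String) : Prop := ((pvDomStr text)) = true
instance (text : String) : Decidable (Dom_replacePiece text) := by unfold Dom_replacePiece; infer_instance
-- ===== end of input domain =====

-- B replaces A's twelve sequential whole-string str.replace passes (and A's dict) by one
-- character-by-character pass that looks each character up by position in a parallel
-- key/value string pair; return values are equal.

-- ===== PORT A =====
-- A's dict literal PIECE_SYMBOLS (string keys, as in the Python source)
def aPieces : PySem.Dict String String := PySem.Dict.ofList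
  [("P", "♟"), ("B", "♝"), ("N", "♞"),
   ("R", "♜"), ("Q", "♛"), ("K", "♚"),
   ("p", "♙"), ("b", "♗"), ("n", "♘"),
   ("r", "♖"), ("q", "♕"), ("k", "♔")]

-- for k, v in PIECE_SYMBOLS.items(): text = text.replace(k, v)
def replacePiece (text : String) : String :=
  aPieces.items.foldl (fun t kv => PySem.Str.replace t kv.1 kv.2) text

-- ===== PORT B =====
-- keys = "PBNRQKpbnrqk"; vals = "♟♝♞♜♛♚♙♗♘♖♕♔" (parallel strings, as lists of code points)
def bKeys : List Char := ['P', 'B', 'N', 'R', 'Q', 'K', 'p', 'b', 'n', 'r', 'q', 'k']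
def bVals : List Char := ['♟', '♝', '♞', '♜', '♛', '♚', '♙', '♗', '♘', '♖', '♕', '♔']

-- vals[i] if i >= 0 else c, with i = keys.find(c); keys.find returns -1 or an index < 12,
-- so vals[i] never raises (the `none` arm of pyGet? is unreachable)
def bLookup (c : Char) : Char :=
  let i := PySem.Chars.find bKeys [c]
  if 0 ≤ i then
    match PySem.List.pyGet? bVals i with
    | some v => v
    | none => c
  else c

-- out = []; for c in text: out.append(…); return ''.join(out)
def replacePiece_alt (text : String) : String :=
  String.ofList (text.toList.foldl (fun out c => out ++ [bLookup c]) [])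

-- ===== PRECONDITION & SPEC =====
def Spec_replacePiece (text : String) (out : String) : Prop := out = replacePiece_alt text
instance (text : String) (out : String) : Decidable (Spec_replacePiece text out) := by unfold Spec_replacePiece; infer_instance

-- ===== CLAIM (what is proved, stated in full; the proofs are below) =====
def Claim_equal_replacePiece : Prop := ∀ (text : String), Dom_replacePiece text → Spec_replacePiece text (replacePiece text)

-- ===== LEMMAS AND PROOFS =====

-- Python's str.replace with a single-character pattern maps each equal character to `new`.
theorem go_single (k : Char) (new : List Char) :
    ∀ (l : List Char) (fuel : Nat), l.length ≤ fuel → ∀ (acc : List Char),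
      PySem.Chars.replace.go [k] new fuel l acc =
        acc.reverse ++ l.flatMap (fun c => if c = k then new else [c]) := by
  intro l
  induction l with
  | nil => intro fuel _ acc; cases fuel <;> simp [PySem.Chars.replace.go]
  | cons c t ih =>
    intro fuel hf acc
    cases fuel with
    | zero => simp at hf
    | succ f =>
      simp only [PySem.Chars.replace.go]
      by_cases hk : k = c
      · subst hk
        simp only [List.isPrefixOf, beq_self_eq_true, Bool.true_and, if_true,
          List.length_cons] at *
        rw [show List.drop ([].length + 1) (k :: t) = t from rfl]
        rw [ih f (by omega) _]
        simp
      · have hpf : [k].isPrefixOf (c :: t) = false := by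
          simp only [List.isPrefixOf, Bool.and_true, beq_eq_false_iff_ne]
          exact hk
        rw [hpf]
        simp only [Bool.false_eq_true, if_false]
        rw [ih f (by simp at hf; omega) _]
        have hck : ¬ (c = k) := fun h => hk h.symm
        simp [hck]

theorem replace_single (s : List Char) (k : Char) (new : List Char) :
    PySem.Chars.replace s [k] new = s.flatMap (fun c => if c = k then new else [c]) := by
  simp only [PySem.Chars.replace]
  rw [go_single k new s s.length (le_refl _) []]
  simp

-- one step of A, on char lists
def stepC (k : Char) (v : List Char) (s : List Char) : List Char :=
  s.flatMap (fun c => if c = k then v else [c])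

-- A's twelve passes, on char lists (P first, as in the dict's iteration order)
def chainA (s : List Char) : List Char :=
  stepC 'k' ['♔'] (stepC 'q' ['♕'] (stepC 'r' ['♖'] (stepC 'n' ['♘'] (stepC 'b' ['♗']
    (stepC 'p' ['♙'] (stepC 'K' ['♚'] (stepC 'Q' ['♛'] (stepC 'R' ['♜'] (stepC 'N' ['♞']
      (stepC 'B' ['♝'] (stepC 'P' ['♟'] s)))))))))))

theorem chainA_eq_A (text : String) : (replacePiece text).toList = chainA text.toList := by
  simp only [replacePiece]
  rw [show aPieces.items =
    [("P", "♟"), ("B", "♝"), ("N", "♞"), ("R", "♜"), ("Q", "♛"), ("K", "♚"),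
     ("p", "♙"), ("b", "♗"), ("n", "♘"), ("r", "♖"), ("q", "♕"), ("k", "♔")] from by decide]
  simp only [List.foldl, PySem.Str.toList_replace, chainA, stepC]
  simp [replace_single]

theorem chainA_append (xs ys : List Char) :
    chainA (xs ++ ys) = chainA xs ++ chainA ys := by
  simp [chainA, stepC, List.flatMap_append]

theorem chainA_single (c : Char) : chainA [c] = [bLookup c] := by
  by_cases h1 : c = 'P'; · subst h1; decide
  by_cases h2 : c = 'B'; · subst h2; decide
  by_cases h3 : c = 'N'; · subst h3; decide
  by_cases h4 : c = 'R'; · subst h4; decide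
  by_cases h5 : c = 'Q'; · subst h5; decide
  by_cases h6 : c = 'K'; · subst h6; decide
  by_cases h7 : c = 'p'; · subst h7; decide
  by_cases h8 : c = 'b'; · subst h8; decide
  by_cases h9 : c = 'n'; · subst h9; decide
  by_cases h10 : c = 'r'; · subst h10; decide
  by_cases h11 : c = 'q'; · subst h11; decide
  by_cases h12 : c = 'k'; · subst h12; decide
  have hmem : c ∉ bKeys := by
    simp [bKeys, h1, h2, h3, h4, h5, h6, h7, h8, h9, h10, h11, h12]
  have hfind : PySem.Chars.find bKeys [c] = -1 := by
    rw [PySem.Chars.find_eq_neg_one_iff]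
    intro hinf
    exact hmem (hinf.subset (List.mem_singleton_self c))
  have hlook : bLookup c = c := by
    simp [bLookup, hfind]
  rw [hlook]
  simp [chainA, stepC, h1, h2, h3, h4, h5, h6, h7, h8, h9, h10, h11, h12]

theorem chainA_eq_map (cs : List Char) : chainA cs = cs.map bLookup := by
  induction cs with
  | nil => decide
  | cons c t ih =>
    rw [show c :: t = [c] ++ t from rfl, chainA_append, chainA_single, ih]
    simp

-- ===== VERDICT (by name: the statement is the Claim_ definition above) =====
theorem replacePiece_spec : Claim_equal_replacePiece := by
  intro text _
  unfold Spec_replacePiece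
  apply String.toList_inj.mp
  rw [chainA_eq_A, chainA_eq_map]
  simp only [replacePiece_alt, PySem.List.foldl_append_singleton_eq_map, String.toList_ofList]
  simp
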